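-- pv_equiv track=rewrite | github.com/iamDo/advent-of-code-2024 | Day5/1.py | separate_orders_and_rules
-- ===== SOURCE A (Python) =====
-- def separate_orders_and_rules(lines):
--     rules = []
--     orders = []
--     add_to_rules = True
--     for line in lines:
--         if line == '':
--             add_to_rules = False
--             continue
--         if add_to_rules:
--             rule = line.split("|")
--             rules.append(rule)
--         else:
--             order = line.split(",")
--             orders.append(order)
--
--     return orders, rules
-- ===== SOURCE B (Python) =====
-- def separate_orders_and_rules(lines):
--     if '' in lines:
--         i = lines.index('')
--         rules = [l.split('|') for l in lines[:i]]
--         orders = [l.split(',') for l in lines[i+1:] if l != '']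
--     else:
--         rules = [l.split('|') for l in lines]
--         orders = []
--     return orders, rules
-- ===== Notes on version B (the rewrite author's own statement) =====
-- stated objective: simpler
-- what changed: Replaces the flag-driven single pass with locating the first blank separator line and building rules/orders by comprehensions over the prefix and suffix slices.
import Mathlib
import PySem

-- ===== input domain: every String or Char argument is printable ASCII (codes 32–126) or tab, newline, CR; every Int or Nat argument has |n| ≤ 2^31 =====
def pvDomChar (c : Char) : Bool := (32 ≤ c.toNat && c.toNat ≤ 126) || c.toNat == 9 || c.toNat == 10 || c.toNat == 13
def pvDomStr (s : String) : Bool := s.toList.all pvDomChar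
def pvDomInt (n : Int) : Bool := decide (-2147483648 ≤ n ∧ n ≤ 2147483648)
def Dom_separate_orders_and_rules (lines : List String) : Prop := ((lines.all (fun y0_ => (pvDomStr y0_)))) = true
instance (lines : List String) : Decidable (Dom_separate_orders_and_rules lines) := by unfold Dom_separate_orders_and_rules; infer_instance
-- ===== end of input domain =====

-- B replaces A's flag-driven single pass by locating the first blank separator line and
-- building rules/orders from the prefix and suffix slices (objective: simpler decomposition).


-- ===== PORT A =====
-- s.split(sep) for a nonempty literal sep: split? is some there, so getD is exact
def pySplit (s sep : String) : List String := (PySem.Str.split? s sep).getD []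

-- the for-loop of A, carrying (rules, orders, add_to_rules) as state
def soarGoA : List String → List (List String) → List (List String) → Bool →
    List (List String) × List (List String)
  | [], rules, orders, _ => (orders, rules)
  | l :: rest, rules, orders, flag =>
    if l = "" then soarGoA rest rules orders false
    else if flag then soarGoA rest (rules ++ [pySplit l "|"]) orders flag
    else soarGoA rest rules (orders ++ [pySplit l ","]) flag

def separate_orders_and_rules (lines : List String) : List (List String) × List (List String) :=
  soarGoA lines [] [] true

-- ===== PORT B =====
def separate_orders_and_rules_alt (lines : List String) : List (List String) × List (List String) :=
  match PySem.List.index? lines "" with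
  | none => ([], lines.map (fun l => pySplit l "|"))
  | some i =>
    (((PySem.List.slice lines (some ((i : Int) + 1)) none).filter (fun l => l ≠ "")).map
        (fun l => pySplit l ","),
      (PySem.List.slice lines none (some (i : Int))).map (fun l => pySplit l "|"))

-- ===== PRECONDITION & SPEC =====
def Spec_separate_orders_and_rules (lines : List String) (out : List (List String) × List (List String)) : Prop := out = separate_orders_and_rules_alt lines
instance (lines : List String) (out : List (List String) × List (List String)) : Decidable (Spec_separate_orders_and_rules lines out) := by unfold Spec_separate_orders_and_rules; infer_instance

-- ===== CLAIM (what is proved, stated in full; the proofs are below) =====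
def Claim_equal_separate_orders_and_rules : Prop := ∀ (lines : List String), Dom_separate_orders_and_rules lines → Spec_separate_orders_and_rules lines (separate_orders_and_rules lines)

-- ===== LEMMAS AND PROOFS =====

-- once the flag is off, the rest of the loop appends the split non-blank lines to orders
lemma soarGoA_false (rest : List String) :
    ∀ rules orders, soarGoA rest rules orders false =
      (orders ++ (rest.filter (fun l => l ≠ "")).map (fun l => pySplit l ","), rules) := by
  induction rest with
  | nil => intro rules orders; simp [soarGoA]
  | cons l rest ih =>
    intro rules orders
    by_cases hl : l = "" <;> simp [soarGoA, hl, ih]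

-- characterisation of the whole loop via the position of the first blank line
lemma soarGoA_true (lines : List String) :
    ∀ rules orders, soarGoA lines rules orders true =
      match PySem.List.index? lines "" with
      | none => (orders, rules ++ lines.map (fun l => pySplit l "|"))
      | some i =>
        (orders ++ ((lines.drop (i + 1)).filter (fun l => l ≠ "")).map (fun l => pySplit l ","),
         rules ++ (lines.take i).map (fun l => pySplit l "|")) := by
  induction lines with
  | nil => intro rules orders; simp [soarGoA, PySem.List.index?]
  | cons l rest ih =>
    intro rules orders
    by_cases hl : l = ""
    · subst hl
      rw [show PySem.List.index? ("" :: rest) "" = some 0 from PySem.List.index?_cons_self "" rest]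
      simp [soarGoA, soarGoA_false]
    · rw [PySem.List.index?_cons_of_ne rest hl]
      simp only [soarGoA, if_neg hl, ih]
      cases h : PySem.List.index? rest "" with
      | none => simp
      | some i => simp

theorem soar_eq (lines : List String) :
    separate_orders_and_rules lines = separate_orders_and_rules_alt lines := by
  unfold separate_orders_and_rules separate_orders_and_rules_alt
  rw [soarGoA_true]
  cases h : PySem.List.index? lines "" with
  | none => simp
  | some i =>
    dsimp only
    rw [show ((i : Int) + 1) = ((i + 1 : Nat) : Int) by push_cast; ring,
      PySem.List.slice_from_natCast, PySem.List.slice_to_natCast]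
    simp

-- ===== VERDICT (by name: the statement is the Claim_ definition above) =====
theorem separate_orders_and_rules_spec : Claim_equal_separate_orders_and_rules := by
  intro lines _
  exact soar_eq lines
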